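-- pv_equiv track=rewrite | github.com/chopinx/snowland | nov.py | minimumHealth
-- ===== SOURCE A (Python) =====
-- from functools import lru_cache
-- from typing import List
--
-- def minimumHealth(damage: List[int], armor: int) -> int:
--     left_damage, ds = [0] * len(damage), 0
--     for i in range(len(damage)):
--         ds += damage[-i-1]
--         left_damage[-i-1] = ds
--
--     @lru_cache(None)
--     def dp(start: int, a: int):
--         if a == 0:
--             return left_damage[start] + 1
--         if start == len(damage) - 1:
--             return max(damage[-1] - a + 1, 1)
--         return min(dp(start+1, a)+damage[start], dp(start+1, 0)+max(0, damage[start]-a))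
--     return dp(0, armor)
-- ===== SOURCE B (Python) =====
-- from typing import List
--
-- def minimumHealth(damage: List[int], armor: int) -> int:
--     # Closed form: use the armor on the single largest attack.
--     return sum(damage) - min(armor, max(damage)) + 1
-- ===== Notes on version B (the rewrite author's own statement) =====
-- stated objective: faster
-- what changed: Replaces the prefix-suffix-sum table plus memoized two-state recursion with the one-pass closed form sum(damage) - min(armor, max(damage)) + 1.
-- outside the precondition, e.g. on minimumHealth([-1], 0): A returns 0, B returns 1; on minimumHealth([-5, -1], 0): A returns -5, B returns -4
import Mathlib
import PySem

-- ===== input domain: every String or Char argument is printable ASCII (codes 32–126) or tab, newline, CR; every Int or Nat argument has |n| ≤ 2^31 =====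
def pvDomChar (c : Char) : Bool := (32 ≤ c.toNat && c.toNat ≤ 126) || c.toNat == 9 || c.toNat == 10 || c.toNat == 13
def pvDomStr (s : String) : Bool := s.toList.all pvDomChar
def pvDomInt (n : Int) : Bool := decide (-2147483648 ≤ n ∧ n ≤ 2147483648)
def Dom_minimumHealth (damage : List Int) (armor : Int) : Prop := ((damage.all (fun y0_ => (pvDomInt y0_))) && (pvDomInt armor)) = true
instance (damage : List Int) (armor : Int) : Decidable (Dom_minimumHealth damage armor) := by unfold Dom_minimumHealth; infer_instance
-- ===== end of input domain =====

-- B replaces A's suffix-sum table + memoized two-state recursion by the O(1)-space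
-- closed form sum(damage) - min(armor, max(damage)) + 1 (objective: faster, constant factor / space).

-- ===== PORT A =====
-- the `for i in range(len(damage))` loop building (left_damage, ds); Python's
-- negative indices -i-1 are ported exactly via pySetD / pyGetD on the Int index -i-1
def buildLeftA (damage : List Int) : List Int × Int :=
  (PySem.List.pyRange 0 (PySem.List.len damage) 1).foldl
    (fun st i =>
      let ds := st.2 + PySem.List.pyGetD damage (-i - 1) 0
      (PySem.List.pySetD st.1 (-i - 1) ds, ds))
    (List.replicate damage.length 0, 0)

-- dp(start, a), the lru_cache'd recursion; fuel = number of remaining indices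
-- (≥ len(damage) - start on every reachable call, so the fuel-out 0 is never hit inside Pre_)
def dpA (damage left : List Int) : Nat → Nat → Int → Int
  | 0, _, _ => 0
  | fuel + 1, start, a =>
    if a = 0 then PySem.List.pyGetD left (start : Int) 0 + 1
    else if (start : Int) = PySem.List.len damage - 1 then
      max (PySem.List.pyGetD damage (-1) 0 - a + 1) 1
    else
      min (dpA damage left fuel (start + 1) a + PySem.List.pyGetD damage (start : Int) 0)
          (dpA damage left fuel (start + 1) 0 +
            max 0 (PySem.List.pyGetD damage (start : Int) 0 - a))

def minimumHealth (damage : List Int) (armor : Int) : Int :=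
  dpA damage (buildLeftA damage).1 damage.length 0 armor

-- ===== PORT B =====
-- sum(damage) - min(armor, max(damage)) + 1;  max([]) raises ValueError (excluded by Pre_)
def minimumHealth_alt (damage : List Int) (armor : Int) : Int :=
  match PySem.List.max? damage (fun y => y) with
  | some m => damage.sum - min armor m + 1
  | none => 0

-- ===== PRECONDITION & SPEC =====
-- Pre_ excludes the empty list, on which both Pythons raise (A IndexError, B ValueError),
-- and the corner armor == 0 with every damage value negative, where A's `a == 0` shortcut
-- (sum+1) and the closed form are two equally accidental answers to a nonsense input.
def Pre_minimumHealth (damage : List Int) (armor : Int) : Prop :=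
  damage ≠ [] ∧ (armor = 0 → ∃ x ∈ damage, 0 ≤ x)
instance (damage : List Int) (armor : Int) : Decidable (Pre_minimumHealth damage armor) := by
  unfold Pre_minimumHealth; infer_instance

def pvWitness_minimumHealth : List Int × Int := ([3, 5, 2], 4)

def Spec_minimumHealth (damage : List Int) (armor : Int) (out : Int) : Prop := out = minimumHealth_alt damage armor
instance (damage : List Int) (armor : Int) (out : Int) : Decidable (Spec_minimumHealth damage armor out) := by unfold Spec_minimumHealth; infer_instance

-- ===== CLAIM (what is proved, stated in full; the proofs are below) =====
def Claim_equal_minimumHealth : Prop := ∀ (damage : List Int) (armor : Int), Dom_minimumHealth damage armor → Pre_minimumHealth damage armor → Spec_minimumHealth damage armor (minimumHealth damage armor)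

-- ===== LEMMAS AND PROOFS =====

-- suffix sum from index j
def sufSum (damage : List Int) (j : Nat) : Int := (damage.drop j).sum
-- maximum of damage[j:] (0 on the empty suffix, never used there)
def sufMax (damage : List Int) (j : Nat) : Int :=
  match damage.drop j with
  | [] => 0
  | x :: t => t.foldl max x

lemma pySetD_neg_succ (xs : List Int) (k : Nat) (h : k < xs.length) (v : Int) :
    PySem.List.pySetD xs (-(k:Int)-1) v = xs.set (xs.length - (k+1)) v := by
  have h2 : -(xs.length:Int) ≤ -(k:Int)-1 := by omega
  have h4 : ¬ ((1:Int) ≤ -(k:Int)) := by omega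
  have h5 : ((1:Int) + (k:Int)).toNat = k+1 := by omega
  simp [PySem.List.pySetD, PySem.List.pySet?, PySem.List.pyIdx?, h2, h4, h5]

lemma pyGetD_neg_succ (xs : List Int) (k : Nat) (h : k < xs.length) (d : Int) :
    PySem.List.pyGetD xs (-(k:Int)-1) d = xs[xs.length - (k+1)]'(by omega) := by
  have : -(k:Int)-1 = -((k+1:Nat):Int) := by push_cast; ring
  rw [this, PySem.List.pyGetD_neg_natCast xs (k+1) d (by omega) (by omega)]

lemma sufSum_step (damage : List Int) (j : Nat) (h : j < damage.length) :
    sufSum damage j = damage[j] + sufSum damage (j+1) := by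
  unfold sufSum
  rw [List.drop_eq_getElem_cons h, List.sum_cons]

lemma sufMax_step (damage : List Int) (j : Nat) (h : j + 1 < damage.length) :
    sufMax damage j = max damage[j] (sufMax damage (j+1)) := by
  have hd : damage.drop j = damage[j] :: damage.drop (j+1) := List.drop_eq_getElem_cons (by omega)
  have hd' : damage.drop (j+1) = damage[j+1] :: damage.drop (j+2) := List.drop_eq_getElem_cons (by omega)
  simp only [sufMax, hd, hd', List.foldl_cons]
  exact List.foldl_assoc

lemma sufMax_last (damage : List Int) (h : damage ≠ []) :
    sufMax damage (damage.length - 1) = damage.getLast h := by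
  have hlt : damage.length - 1 < damage.length := by
    cases damage with | nil => simp at h | cons a t => simp
  have hd : damage.drop (damage.length - 1)
      = damage[damage.length - 1] :: damage.drop (damage.length - 1 + 1) :=
    List.drop_eq_getElem_cons hlt
  rw [show damage.length - 1 + 1 = damage.length by omega] at hd
  simp [sufMax, hd, List.getLast_eq_getElem]

-- invariant of the left_damage-building loop, by induction on the prefix length k
lemma buildLeftA_inv (damage : List Int) (k : Nat) (hk : k ≤ damage.length) :
    ((PySem.List.pyRange 0 (k : Int) 1).foldl
      (fun st i =>
        let ds := st.2 + PySem.List.pyGetD damage (-i - 1) 0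
        (PySem.List.pySetD st.1 (-i - 1) ds, ds))
      (List.replicate damage.length 0, 0)).1.length = damage.length ∧
    ((PySem.List.pyRange 0 (k : Int) 1).foldl
      (fun st i =>
        let ds := st.2 + PySem.List.pyGetD damage (-i - 1) 0
        (PySem.List.pySetD st.1 (-i - 1) ds, ds))
      (List.replicate damage.length 0, 0)).2 = sufSum damage (damage.length - k) ∧
    ∀ j, (hj : j < damage.length) →
      ((PySem.List.pyRange 0 (k : Int) 1).foldl
        (fun st i =>
          let ds := st.2 + PySem.List.pyGetD damage (-i - 1) 0
          (PySem.List.pySetD st.1 (-i - 1) ds, ds))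
        (List.replicate damage.length 0, 0)).1.getD j 0 =
        if damage.length - k ≤ j then sufSum damage j else 0 := by
  induction k with
  | zero =>
    refine ⟨by simp, by simp [sufSum], ?_⟩
    intro j hj
    rw [if_neg (by omega)]
    simp
  | succ k ih =>
    obtain ⟨ihlen, ihds, ihget⟩ := ih (by omega)
    have hsplit : PySem.List.pyRange 0 ((k+1 : Nat) : Int) 1
        = PySem.List.pyRange 0 (k : Int) 1 ++ [(k : Int)] := by
      have : ((k+1 : Nat) : Int) = (k : Int) + 1 := by push_cast; ring
      rw [this, PySem.List.pyRange_one_succ_right (by omega)]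
    rw [hsplit, List.foldl_append]
    set st := (PySem.List.pyRange 0 (k : Int) 1).foldl
      (fun st i =>
        let ds := st.2 + PySem.List.pyGetD damage (-i - 1) 0
        (PySem.List.pySetD st.1 (-i - 1) ds, ds))
      (List.replicate damage.length 0, 0) with hst
    simp only [List.foldl_cons, List.foldl_nil]
    have hkd : k < damage.length := by omega
    have hget : PySem.List.pyGetD damage (-(k:Int) - 1) 0
        = damage[damage.length - (k+1)]'(by omega) := pyGetD_neg_succ damage k hkd 0
    have hds' : st.2 + PySem.List.pyGetD damage (-(k:Int) - 1) 0
        = sufSum damage (damage.length - (k+1)) := by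
      rw [hget, ihds]
      have h1 : damage.length - (k+1) < damage.length := by omega
      rw [sufSum_step damage _ h1]
      have : damage.length - (k+1) + 1 = damage.length - k := by omega
      rw [this]
      ring
    have hset : PySem.List.pySetD st.1 (-(k:Int) - 1)
          (st.2 + PySem.List.pyGetD damage (-(k:Int) - 1) 0)
        = st.1.set (st.1.length - (k+1))
          (st.2 + PySem.List.pyGetD damage (-(k:Int) - 1) 0) := by
      exact pySetD_neg_succ st.1 k (by omega) _
    refine ⟨?_, ?_, ?_⟩
    · simpa [hset] using ihlen
    · exact hds'
    · intro j hj
      simp only [hset, ihlen]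
      rw [List.getD_eq_getElem _ _ (by simp [ihlen]; omega)]
      rw [List.getElem_set]
      by_cases hje : damage.length - (k+1) = j
      · rw [if_pos hje, if_pos (by omega)]
        rw [hds', hje]
      · rw [if_neg hje]
        have := ihget j hj
        rw [List.getD_eq_getElem _ _ (by omega)] at this
        rw [this]
        by_cases hcase : damage.length - k ≤ j
        · rw [if_pos hcase, if_pos (by omega)]
        · rw [if_neg hcase, if_neg (by omega)]

lemma buildLeftA_getD (damage : List Int) (j : Nat) (hj : j < damage.length) :
    PySem.List.pyGetD (buildLeftA damage).1 (j : Int) 0 = sufSum damage j := by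
  have h := buildLeftA_inv damage damage.length (le_refl _)
  obtain ⟨_, _, hget⟩ := h
  have := hget j hj
  rw [if_pos (by omega)] at this
  simpa [buildLeftA, PySem.List.len] using this

-- characterization of dp(start, a) for sufficient fuel
lemma dpA_char (damage left : List Int)
    (hleft : ∀ j, j < damage.length → PySem.List.pyGetD left (j : Int) 0 = sufSum damage j) :
    ∀ fuel start, start < damage.length → damage.length ≤ fuel + start → ∀ a,
      dpA damage left fuel start a =
        if a = 0 then sufSum damage start + 1
        else sufSum damage start - min (sufMax damage start) a + 1 := by
  intro fuel
  induction fuel with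
  | zero => intro start h1 h2; omega
  | succ fuel ih =>
    intro start h1 h2 a
    have hne : damage ≠ [] := by intro h; rw [h] at h1; simp at h1
    by_cases ha : a = 0
    · simp [dpA, ha, hleft start h1]
    · rw [if_neg ha]
      by_cases hlast : (start : Int) = PySem.List.len damage - 1
      · have hstart : start = damage.length - 1 := by
          simp [PySem.List.len] at hlast; omega
        simp only [dpA, if_neg ha, if_pos hlast]
        rw [PySem.List.pyGetD_neg_one damage 0 hne, ← sufMax_last damage hne, ← hstart]
        have hsum : sufSum damage start = sufMax damage start := by
          rw [hstart, sufMax_last damage hne]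
          have hd : damage.drop (damage.length - 1)
              = damage[damage.length - 1] :: damage.drop (damage.length - 1 + 1) :=
            List.drop_eq_getElem_cons (by omega)
          rw [show damage.length - 1 + 1 = damage.length by omega] at hd
          simp [sufSum, hd, List.getLast_eq_getElem]
        rw [hsum]
        omega
      · have hstart1 : start + 1 < damage.length := by
          simp [PySem.List.len] at hlast; omega
        simp only [dpA, if_neg ha, if_neg hlast]
        rw [ih (start+1) hstart1 (by omega) a, ih (start+1) hstart1 (by omega) 0,
          if_neg ha, if_pos rfl]
        rw [PySem.List.pyGetD_eq_getElem damage (i := (start : Int)) 0 (by omega) (by exact_mod_cast h1)]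
        have htn : ((start : Int)).toNat = start := by omega
        rw [sufSum_step damage start (by omega), sufMax_step damage start hstart1]
        simp only [htn]
        omega

-- ===== VERDICT (by name: the statement is the Claim_ definition above) =====
theorem minimumHealth_spec : Claim_equal_minimumHealth := by
  intro damage armor _hDom hPre
  obtain ⟨hne, hnn⟩ := hPre
  obtain ⟨x, t, rfl⟩ := List.exists_cons_of_ne_nil hne
  have halt : minimumHealth_alt (x :: t) armor = (x :: t).sum - min armor (t.foldl max x) + 1 := by
    simp [minimumHealth_alt, PySem.List.max?_id_cons]
  unfold Spec_minimumHealth minimumHealth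
  rw [halt]
  have hchar := dpA_char (x :: t) (buildLeftA (x :: t)).1
    (fun j hj => buildLeftA_getD (x :: t) j hj)
    (x :: t).length 0 (by simp) (by omega) armor
  rw [hchar]
  have hM : sufMax (x :: t) 0 = t.foldl max x := by simp [sufMax]
  have hS : sufSum (x :: t) 0 = (x :: t).sum := by simp [sufSum]
  by_cases ha : armor = 0
  · rw [if_pos ha, ha]
    obtain ⟨y, hy, hy0⟩ := hnn ha
    have hle : y ≤ t.foldl max x := by
      have := PySem.List.max?_isMax (PySem.List.max?_id_cons x t) y hy
      simpa using this
    rw [hS]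
    omega
  · rw [if_neg ha, hM, hS]
    omega
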